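-- pv_equiv track=rewrite | github.com/diraneyya/protected-usb | gen_targeted_arabic.py | generate_name_digits
-- ===== SOURCE A (Python) =====
-- def char_len(s):
--     """Count characters (not bytes) for length validation"""
--     return len(s)
--
-- def generate_name_digits(names):
--     """Pattern: Name + 1-4 digits"""
--     for name in names:
--         # 1 digit
--         for d in range(10):
--             pwd = f"{name}{d}"
--             if 8 <= char_len(pwd) <= 20:
--                 yield pwd
--         # 2 digits
--         for d in range(100):
--             pwd = f"{name}{d:02d}"
--             if 8 <= char_len(pwd) <= 20:
--                 yield pwd
--         # 3 digits
--         for d in range(1000):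
--             pwd = f"{name}{d:03d}"
--             if 8 <= char_len(pwd) <= 20:
--                 yield pwd
--         # 4 digits (includes years)
--         for d in range(10000):
--             pwd = f"{name}{d:04d}"
--             if 8 <= char_len(pwd) <= 20:
--                 yield pwd
-- ===== SOURCE B (Python) =====
-- def generate_name_digits(names):
--     """Pattern: Name + 1-4 digits.
--
--     The suffix tables (all zero-padded digit strings of width 1..4) are built
--     ONCE up front by iterated string extension, and the 8..20 length filter is
--     lifted from a per-password check to a per-width arithmetic test on len(name):
--     a width-k suffix passes iff 8 - len(name) <= k <= 20 - len(name)."""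
--     digits = [str(d) for d in range(10)]
--     tables = []
--     level = digits
--     for _ in range(4):
--         tables.append(level)
--         level = [s + c for s in level for c in digits]
--     for name in names:
--         L = len(name)
--         for k in range(1, 5):
--             if 8 - L <= k <= 20 - L:
--                 for s in tables[k - 1]:
--                     yield name + s
-- ===== Notes on version B (the rewrite author's own statement) =====
-- stated objective: faster
-- what changed: B precomputes the four zero-padded suffix tables once by iterated string extension and lifts the 8..20 length filter from a per-password check (11110 checks per name in A) to a single arithmetic width test per name, emitting whole tables unconditionally; A formats every integer with width-specific f-strings and filters each candidate individually.
import Mathlib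
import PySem

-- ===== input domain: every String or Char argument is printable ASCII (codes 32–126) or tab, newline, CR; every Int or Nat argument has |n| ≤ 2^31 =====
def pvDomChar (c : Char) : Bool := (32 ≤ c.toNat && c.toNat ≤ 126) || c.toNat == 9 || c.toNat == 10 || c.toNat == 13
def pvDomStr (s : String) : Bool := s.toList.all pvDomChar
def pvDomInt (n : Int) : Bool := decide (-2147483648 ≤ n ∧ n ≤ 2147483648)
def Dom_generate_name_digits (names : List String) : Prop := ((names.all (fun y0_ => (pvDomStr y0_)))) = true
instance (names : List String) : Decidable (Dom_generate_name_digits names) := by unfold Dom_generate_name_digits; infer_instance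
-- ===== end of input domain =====

-- B builds the four zero-padded suffix tables once by iterated string extension and replaces
-- A's per-password length filter with one arithmetic width test per name (measured faster by
-- a timing run); both Pythons are generators and we model the list of yielded values.

-- ===== PORT A =====
def char_len (s : String) : Int := PySem.Str.len s

def generate_name_digits (names : List String) : List String :=
  names.foldl (fun acc name =>
    -- 1 digit
    let acc := (PySem.List.pyRange 0 10 1).foldl (fun acc d =>
      let pwd := name ++ PySem.Int.toStr d
      if 8 ≤ char_len pwd ∧ char_len pwd ≤ 20 then acc ++ [pwd] else acc) acc
    -- 2 digits  (f"{d:02d}" = str(d).zfill(2) for the d ≥ 0 produced by range)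
    let acc := (PySem.List.pyRange 0 100 1).foldl (fun acc d =>
      let pwd := name ++ PySem.Str.zfill (PySem.Int.toStr d) 2
      if 8 ≤ char_len pwd ∧ char_len pwd ≤ 20 then acc ++ [pwd] else acc) acc
    -- 3 digits
    let acc := (PySem.List.pyRange 0 1000 1).foldl (fun acc d =>
      let pwd := name ++ PySem.Str.zfill (PySem.Int.toStr d) 3
      if 8 ≤ char_len pwd ∧ char_len pwd ≤ 20 then acc ++ [pwd] else acc) acc
    -- 4 digits (includes years)
    (PySem.List.pyRange 0 10000 1).foldl (fun acc d =>
      let pwd := name ++ PySem.Str.zfill (PySem.Int.toStr d) 4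
      if 8 ≤ char_len pwd ∧ char_len pwd ≤ 20 then acc ++ [pwd] else acc) acc) []

-- ===== PORT B =====
-- digits = [str(d) for d in range(10)]
def pvDigitsS : List String := ["0", "1", "2", "3", "4", "5", "6", "7", "8", "9"]

-- tables[k] = all digit strings of width k+1; level_{k+1} = [s + c for s in level_k for c in digits]
def pvTab : Nat → List String
  | 0 => pvDigitsS
  | n + 1 => (pvTab n).flatMap (fun s => pvDigitsS.map (fun c => s ++ c))

def generate_name_digits_alt (names : List String) : List String :=
  names.foldl (fun acc name =>
    let L := PySem.Str.len name
    (PySem.List.pyRange 1 5 1).foldl (fun acc k =>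
      if 8 - L ≤ k ∧ k ≤ 20 - L then
        (pvTab (k.toNat - 1)).foldl (fun acc s => acc ++ [name ++ s]) acc
      else acc) acc) []

-- ===== PRECONDITION & SPEC =====
def Spec_generate_name_digits (names : List String) (out : List String) : Prop := out = generate_name_digits_alt names
instance (names : List String) (out : List String) : Decidable (Spec_generate_name_digits names out) := by unfold Spec_generate_name_digits; infer_instance

-- ===== CLAIM (what is proved, stated in full; the proofs are below) =====
def Claim_equal_generate_name_digits : Prop := ∀ (names : List String), Dom_generate_name_digits names → Spec_generate_name_digits names (generate_name_digits names)

-- ===== LEMMAS AND PROOFS =====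

-- char-level models: A's zero-padded decimal list and a one-digit-extension step
def pvPadN (w n : Nat) : List Char := PySem.Chars.zfill (Nat.toDigits 10 n) (w : Int)
def pvLA (k : Nat) : List (List Char) := (List.range (10 ^ k)).map (pvPadN k)
def pvAppendDigits (l : List (List Char)) : List (List Char) :=
  l.flatMap (fun s => (List.range 10).map (fun u => s ++ [Nat.digitChar u]))

lemma pvZfill_digits (cs : List Char) (w : Nat) (h : ∀ c ∈ cs, c.isDigit) :
    PySem.Chars.zfill cs (w : Int) = List.replicate (w - cs.length) '0' ++ cs := by
  unfold PySem.Chars.zfill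
  split
  · next hle =>
    have hw : w ≤ cs.length := by exact_mod_cast hle
    simp [Nat.sub_eq_zero_of_le hw]
  · next hgt =>
    match cs, h with
    | [], _ => simp
    | c :: rest, h =>
      have hd : c.isDigit := h c (by simp)
      have hne : ¬ (c = '+' ∨ c = '-') := by
        rintro (rfl | rfl) <;> simp [Char.isDigit] at hd
      simp [if_neg hne]

lemma pvDigits_toDigits (n : Nat) : ∀ c ∈ Nat.toDigits 10 n, c.isDigit :=
  fun _ hc => Nat.isDigit_of_mem_toDigits (by norm_num) (by norm_num) hc

lemma pvPadN_succ (k t u : Nat) (hk : 1 ≤ k) (hu : u < 10) :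
    pvPadN (k + 1) (10 * t + u) = pvPadN k t ++ [Nat.digitChar u] := by
  have hdu : (Nat.digitChar u).isDigit := by
    rw [Nat.isDigit_digitChar]; simpa using hu
  rcases Nat.eq_zero_or_pos t with rfl | ht
  · rw [pvPadN, pvPadN, Nat.mul_zero, Nat.zero_add, Nat.toDigits_of_lt_base hu,
        Nat.toDigits_zero, pvZfill_digits _ _ (by simpa using hdu),
        pvZfill_digits _ _ (by intro c hc; simp at hc; subst hc; decide)]
    simp only [List.length_cons, List.length_nil]
    have hrep : List.replicate k '0' = List.replicate (k - 1) '0' ++ ['0'] := by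
      have : k = (k - 1) + 1 := by omega
      rw [this]; simp [List.replicate_succ']
    rw [show k + 1 - 1 = k from rfl, hrep]
  · have happ : Nat.toDigits 10 (10 * t + u) = Nat.toDigits 10 t ++ [Nat.digitChar u] := by
      rw [← Nat.toDigits_append_toDigits (by norm_num) ht hu, Nat.toDigits_of_lt_base hu]
    rw [pvPadN, pvPadN, happ,
        pvZfill_digits _ _ (by
          intro c hc
          rcases List.mem_append.1 hc with hc | hc
          · exact pvDigits_toDigits t c hc
          · simp at hc; subst hc; exact hdu),
        pvZfill_digits _ _ (pvDigits_toDigits t)]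
    simp only [List.length_append, List.length_cons, List.length_nil]
    rw [show k + 1 - ((Nat.toDigits 10 t).length + (0 + 1)) = k - (Nat.toDigits 10 t).length by omega]
    simp [List.append_assoc]

lemma pvRange_mul_ten (M : Nat) :
    List.range (M * 10) = (List.range M).flatMap (fun t => (List.range 10).map (fun u => 10 * t + u)) := by
  induction M with
  | zero => simp
  | succ M ih =>
    have hsucc : List.range (M + 1) = List.range M ++ [M] := List.range_succ
    rw [Nat.succ_mul, List.range_add, ih, hsucc, List.flatMap_append]
    simp [Nat.mul_comm, Nat.add_comm]

lemma pvLA_succ (k : Nat) : pvLA (k + 2) = pvAppendDigits (pvLA (k + 1)) := by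
  unfold pvLA pvAppendDigits
  rw [pow_succ, pvRange_mul_ten, List.map_flatMap, List.flatMap_map]
  refine List.flatMap_congr (fun t _ => ?_)
  rw [List.map_map]
  refine List.map_congr_left (fun u hu => ?_)
  simp only [Function.comp_apply]
  exact pvPadN_succ (k+1) t u (by omega) (List.mem_range.1 hu)

-- char model of the B-side tables
def pvTabL (n : Nat) : List (List Char) := (pvTab n).map String.toList

lemma pvDigitsS_toList : pvDigitsS.map String.toList = (List.range 10).map (fun u => [Nat.digitChar u]) := by decide

lemma pvTabL_succ (n : Nat) : pvTabL (n + 1) = pvAppendDigits (pvTabL n) := by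
  unfold pvTabL pvAppendDigits
  rw [show pvTab (n + 1) = (pvTab n).flatMap (fun s => pvDigitsS.map (fun c => s ++ c)) from rfl,
      List.map_flatMap, List.flatMap_map]
  refine List.flatMap_congr (fun s _ => ?_)
  rw [List.map_map]
  have : (String.toList ∘ fun c => s ++ c)
       = (fun cs : List Char => s.toList ++ cs) ∘ String.toList := by
    funext c; simp
  rw [this, ← List.map_map, pvDigitsS_toList, List.map_map]
  simp [Function.comp_def]

lemma pvTabL_eq_LA : ∀ n, pvTabL n = pvLA (n + 1)
  | 0 => by decide
  | n + 1 => by rw [pvTabL_succ, pvTabL_eq_LA n, pvLA_succ]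

lemma pvTab_eq (n : Nat) : pvTab n = (pvLA (n + 1)).map String.ofList := by
  rw [← pvTabL_eq_LA, pvTabL, List.map_map]
  symm
  have h : ∀ s ∈ pvTab n, (String.ofList ∘ String.toList) s = id s := fun s _ => by
    simp [Function.comp_apply, String.ofList]
  rw [List.map_congr_left h, List.map_id]

lemma pvBridgeA (k : Nat) :
    (PySem.List.pyRange 0 ((10 ^ k : Nat) : Int) 1).map
        (fun d => PySem.Str.zfill (PySem.Int.toStr d) ((k : Nat) : Int))
      = (pvLA k).map String.ofList := by
  rw [PySem.List.pyRange_one]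
  simp only [Int.sub_zero, Int.toNat_natCast, List.map_map, pvLA]
  refine List.map_congr_left (fun j hj => ?_)
  simp only [Function.comp_apply, Int.zero_add]
  have hchars : PySem.Int.toChars (j : Int) = Nat.toDigits 10 j := by
    simp [PySem.Int.toChars]
  rw [PySem.Str.zfill, PySem.Int.toList_toStr, hchars, pvPadN]

lemma pvTabEq (k : Nat) :
    (PySem.List.pyRange 0 ((10 ^ (k + 1) : Nat) : Int) 1).map
        (fun d => PySem.Str.zfill (PySem.Int.toStr d) (((k + 1) : Nat) : Int))
      = pvTab k := by
  rw [pvBridgeA (k + 1), pvTab_eq]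

-- every width-(n+1) suffix has character length n+1
lemma pvLA_len : ∀ n, ∀ cs ∈ pvLA (n + 1), cs.length = n + 1
  | 0 => by decide
  | n + 1 => by
    intro cs hcs
    rw [pvLA_succ, pvAppendDigits] at hcs
    simp only [List.mem_flatMap, List.mem_map] at hcs
    obtain ⟨s, hs, u, _, rfl⟩ := hcs
    simp [pvLA_len n s hs]

lemma pvTab_len (n : Nat) : ∀ s ∈ pvTab n, PySem.Str.len s = (n : Int) + 1 := by
  intro s hs
  have : s.toList ∈ pvTabL n := List.mem_map_of_mem hs
  rw [pvTabL_eq_LA] at this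
  have := pvLA_len n _ this
  simp [PySem.Str.len_eq, this]

-- A's fold over a constant-width suffix list collapses to B's single width test
lemma pvFoldA (l : List String) (name : String) (k : Int)
    (hlen : ∀ s ∈ l, PySem.Str.len s = k) (acc : List String) :
    l.foldl (fun a s =>
        if 8 ≤ char_len (name ++ s) ∧ char_len (name ++ s) ≤ 20 then a ++ [name ++ s] else a) acc
      = if 8 - PySem.Str.len name ≤ k ∧ k ≤ 20 - PySem.Str.len name then
          l.foldl (fun a s => a ++ [name ++ s]) acc
        else acc := by
  induction l generalizing acc with
  | nil => simp
  | cons s t ih =>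
    have hs : PySem.Str.len s = k := hlen s (by simp)
    have hiff : (8 ≤ char_len (name ++ s) ∧ char_len (name ++ s) ≤ 20)
        ↔ (8 - PySem.Str.len name ≤ k ∧ k ≤ 20 - PySem.Str.len name) := by
      rw [char_len, PySem.Str.len_append, hs]; omega
    simp only [List.foldl_cons]
    rw [ih (fun x hx => hlen x (by simp [hx]))]
    by_cases hc : 8 - PySem.Str.len name ≤ k ∧ k ≤ 20 - PySem.Str.len name
    · rw [if_pos (hiff.mpr hc), if_pos hc, if_pos hc]
    · rw [if_neg (fun h => hc (hiff.mp h)), if_neg hc, if_neg hc]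

lemma pvFold_map {α : Type} (f : α → String) (l1 : List α) (l2 : List String)
    (h : l1.map f = l2) (step : List String → String → List String) (acc : List String) :
    l1.foldl (fun a d => step a (f d)) acc = l2.foldl step acc := by
  rw [show l1.foldl (fun a d => step a (f d)) acc = (l1.map f).foldl step acc from
        (List.foldl_map (f:=f) (g:=step) (l:=l1) (init:=acc)).symm, h]

theorem pv_step_eq (acc : List String) (name : String) :
    (let acc := (PySem.List.pyRange 0 10 1).foldl (fun acc d =>
        let pwd := name ++ PySem.Int.toStr d
        if 8 ≤ char_len pwd ∧ char_len pwd ≤ 20 then acc ++ [pwd] else acc) acc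
      let acc := (PySem.List.pyRange 0 100 1).foldl (fun acc d =>
        let pwd := name ++ PySem.Str.zfill (PySem.Int.toStr d) 2
        if 8 ≤ char_len pwd ∧ char_len pwd ≤ 20 then acc ++ [pwd] else acc) acc
      let acc := (PySem.List.pyRange 0 1000 1).foldl (fun acc d =>
        let pwd := name ++ PySem.Str.zfill (PySem.Int.toStr d) 3
        if 8 ≤ char_len pwd ∧ char_len pwd ≤ 20 then acc ++ [pwd] else acc) acc
      (PySem.List.pyRange 0 10000 1).foldl (fun acc d =>
        let pwd := name ++ PySem.Str.zfill (PySem.Int.toStr d) 4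
        if 8 ≤ char_len pwd ∧ char_len pwd ≤ 20 then acc ++ [pwd] else acc) acc)
    = (let L := PySem.Str.len name
       (PySem.List.pyRange 1 5 1).foldl (fun acc k =>
        if 8 - L ≤ k ∧ k ≤ 20 - L then
          (pvTab (k.toNat - 1)).foldl (fun acc s => acc ++ [name ++ s]) acc
        else acc) acc) := by
  have e1 : (PySem.List.pyRange 0 10 1).map (fun d => PySem.Int.toStr d) = pvTab 0 := by decide
  have e2 := pvTabEq 1
  have e3 := pvTabEq 2
  have e4 := pvTabEq 3
  norm_num at e2 e3 e4
  have hr : PySem.List.pyRange 1 5 1 = [(1:Int), 2, 3, 4] := by decide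
  rw [hr]
  simp only [List.foldl_cons, List.foldl_nil]
  rw [pvFold_map _ _ _ e1 (fun a sfx => if 8 ≤ char_len (name ++ sfx) ∧ char_len (name ++ sfx) ≤ 20 then a ++ [name ++ sfx] else a) acc,
      pvFoldA _ name 1 (by simpa using pvTab_len 0)]
  rw [pvFold_map _ _ _ e2 (fun a sfx => if 8 ≤ char_len (name ++ sfx) ∧ char_len (name ++ sfx) ≤ 20 then a ++ [name ++ sfx] else a),
      pvFoldA _ name 2 (by simpa using pvTab_len 1)]
  rw [pvFold_map _ _ _ e3 (fun a sfx => if 8 ≤ char_len (name ++ sfx) ∧ char_len (name ++ sfx) ≤ 20 then a ++ [name ++ sfx] else a),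
      pvFoldA _ name 3 (by simpa using pvTab_len 2)]
  rw [pvFold_map _ _ _ e4 (fun a sfx => if 8 ≤ char_len (name ++ sfx) ∧ char_len (name ++ sfx) ≤ 20 then a ++ [name ++ sfx] else a),
      pvFoldA _ name 4 (by simpa using pvTab_len 3)]
  rfl

-- ===== VERDICT (by name: the statement is the Claim_ definition above) =====
theorem generate_name_digits_spec : Claim_equal_generate_name_digits := by
  intro names _
  unfold Spec_generate_name_digits generate_name_digits generate_name_digits_alt
  simp only [pv_step_eq]
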